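-- pv_equiv track=rewrite | github.com/seweissman/advent_of_code_2017 | day4_passphrases.py | has_no_repeats
-- ===== SOURCE A (Python) =====
-- from collections import defaultdict
--
-- def has_no_repeats(passphrase):
--     word_list = passphrase.split(" ")
--     word_counts = defaultdict(int)
--     for word in word_list:
--         word_counts[word] += 1
--     for val in word_counts.values():
--         if val > 1:
--             return False
--     return True
-- ===== SOURCE B (Python) =====
-- def has_no_repeats(passphrase):
--     words = sorted(passphrase.split(" "))
--     for prev, cur in zip(words, words[1:]):
--         if prev == cur:
--             return False
--     return True
-- ===== Notes on version B (the rewrite author's own statement) =====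
-- stated objective: alternative
-- what changed: Replaces hash-counting (defaultdict of word frequencies then a value scan) with sort-then-adjacent-scan: sort the words and return False iff two neighbouring words are equal.
import Mathlib
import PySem

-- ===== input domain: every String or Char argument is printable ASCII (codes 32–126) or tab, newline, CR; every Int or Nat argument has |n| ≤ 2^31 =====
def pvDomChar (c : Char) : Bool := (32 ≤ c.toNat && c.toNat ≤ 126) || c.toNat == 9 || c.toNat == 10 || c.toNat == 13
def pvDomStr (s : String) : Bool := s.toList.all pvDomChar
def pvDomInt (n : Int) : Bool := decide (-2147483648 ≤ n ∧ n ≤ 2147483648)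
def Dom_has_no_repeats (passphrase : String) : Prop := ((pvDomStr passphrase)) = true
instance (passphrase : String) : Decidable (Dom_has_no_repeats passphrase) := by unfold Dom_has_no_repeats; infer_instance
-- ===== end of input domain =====

-- B replaces A's hash-counting (frequency dict then value scan) with sort-then-adjacent-scan
-- (objective: alternative algorithm; not claimed faster).

-- ===== PORT A =====
-- passphrase.split(" ") is PySem.Chars.splitOn on the character list (sep nonempty, exact).
def has_no_repeats (passphrase : String) : Bool :=
  let word_list := PySem.Chars.splitOn passphrase.toList [' ']
  let word_counts := word_list.foldl (fun d w => d.modify w (0 : Int) (· + 1)) PySem.Dict.empty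
  if word_counts.values.any (fun v => v > 1) then false else true

-- ===== PORT B =====
-- the 'for prev, cur in zip(words, words[1:]): if prev == cur: return False' loop of Source B;
-- words[1:] is List.drop 1 (exact: Python slice [1:] drops the first element).
def pvAdjScan : List (List Char × List Char) → Bool
  | [] => true
  | (prev, cur) :: rest => if prev == cur then false else pvAdjScan rest

def has_no_repeats_alt (passphrase : String) : Bool :=
  let words := PySem.List.sorted (PySem.Chars.splitOn passphrase.toList [' ']) (fun x => x) false
  pvAdjScan (words.zip (words.drop 1))

-- ===== PRECONDITION & SPEC =====
def Spec_has_no_repeats (passphrase : String) (out : Bool) : Prop := out = has_no_repeats_alt passphrase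
instance (passphrase : String) (out : Bool) : Decidable (Spec_has_no_repeats passphrase out) := by unfold Spec_has_no_repeats; infer_instance

-- ===== CLAIM =====
def Claim_equal_has_no_repeats : Prop := ∀ (passphrase : String), Dom_has_no_repeats passphrase → Spec_has_no_repeats passphrase (has_no_repeats passphrase)

-- ===== LEMMAS AND PROOFS =====

-- A's count-then-scan returns true iff the word list has no duplicates.
theorem pv_A_iff_nodup (ws : List (List Char)) :
    ((if ((ws.foldl (fun d w => d.modify w (0 : Int) (· + 1)) PySem.Dict.empty).values.any (fun v => v > 1)) then false else true) = true)
      ↔ ws.Nodup := by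
  show ((if ((PySem.Dict.counter ws).values.any (fun v => v > 1)) then false else true) = true) ↔ _
  have hv : (PySem.Dict.counter ws).values = (PySem.Set.ofList ws).map (fun k => ((ws.count k : Int))) := by
    simp [PySem.Dict.values, PySem.Dict.items_counter]
  rw [hv, List.nodup_iff_count_le_one]
  constructor
  · intro h k
    by_cases hk : k ∈ ws
    · by_contra hgt
      have hany : ((PySem.Set.ofList ws).map (fun k => ((ws.count k : Int)))).any (fun v => v > 1) = true := by
        simp only [List.any_map, List.any_eq_true, Function.comp]
        exact ⟨k, (PySem.Set.mem_ofList ws k).mpr hk, by simp; exact_mod_cast by omega⟩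
      simp [hany] at h
    · simp [List.count_eq_zero_of_not_mem hk]
  · intro h
    rw [if_neg]
    simp only [List.any_map, List.any_eq_true, Function.comp]
    push Not
    intro k hk
    have := h k
    simp; omega

-- Pairwise-(≤) list: the adjacent scan succeeds iff the list has no duplicates.
theorem pv_scan_iff_nodup : ∀ (l : List (List Char)), l.Pairwise (· ≤ ·) →
    (pvAdjScan (l.zip (l.drop 1)) = true ↔ l.Nodup) := by
  intro l
  induction l with
  | nil => simp [pvAdjScan]
  | cons a t ih =>
    cases t with
    | nil => simp [pvAdjScan]
    | cons b t' =>
      intro h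
      have hab : a ≤ b := (List.pairwise_cons.mp h).1 b (by simp)
      have ht : (b :: t').Pairwise (· ≤ ·) := (List.pairwise_cons.mp h).2
      simp only [List.drop_succ_cons, List.drop_zero, List.zip_cons_cons, pvAdjScan]
      rw [List.nodup_cons]
      constructor
      · intro hs
        split_ifs at hs with he
        have hrest := (ih ht).mp (by simpa using hs)
        refine ⟨?_, hrest⟩
        intro hmem
        rcases List.mem_cons.mp hmem with rfl | hmem'
        · exact he (by simp)
        · have hba : b ≤ a := (List.pairwise_cons.mp ht).1 a hmem'
          exact he (by simp [le_antisymm hab hba])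
      · rintro ⟨hnm, hnd⟩
        have hne : ¬ ((a == b) = true) := by
          intro he
          exact hnm (by simp [show a = b from by simpa using he])
        rw [if_neg hne]
        exact (ih ht).mpr hnd

-- ===== VERDICT =====
theorem has_no_repeats_spec : Claim_equal_has_no_repeats := by
  intro passphrase _
  unfold Spec_has_no_repeats has_no_repeats has_no_repeats_alt
  set ws := PySem.Chars.splitOn passphrase.toList [' '] with hws
  set sw := PySem.List.sorted ws (fun x => x) false with hsw
  have hperm : sw.Perm ws := by
    have := PySem.List.sorted_perm (κ := List Char) ws (fun x => x) (rev := false)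
    convert this using 2
  have hpw : sw.Pairwise (· ≤ ·) := by
    have := PySem.List.sorted_pairwise (κ := List Char) ws (fun x => x)
    convert this using 2
  rw [Bool.eq_iff_iff, pv_A_iff_nodup, pv_scan_iff_nodup sw hpw, hperm.nodup_iff]
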